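-- pv_equiv track=rewrite | github.com/CornerMercury/AOC | 2023/python/day13/fast.py | get_vert
-- ===== SOURCE A (Python) =====
-- def get_vert(square, ogx=-1):
--     for x in range(1, len(square[0])):
--         nx = x - 1
--         px = x
--         while 0 <= nx and px < len(square[0]):
--             if not all(square[y][nx] == square[y][px] for y in range(len(square))):
--                 break
--             nx -= 1
--             px += 1
--         else:
--             if ogx != x:
--                 return x
--     return -1
-- ===== SOURCE B (Python) =====
-- def get_vert(square, ogx=-1):
--     W = len(square[0])
--     cols = list(zip(*square))
--     for x in range(1, W):
--         k = min(x, W - x)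
--         if x != ogx and cols[x - k:x][::-1] == cols[x:x + k]:
--             return x
--     return -1
-- ===== Notes on version B (the rewrite author's own statement) =====
-- stated objective: alternative
-- what changed: B transposes the grid once into column tuples and tests each candidate axis by a single reversed-slice comparison of whole columns, instead of A's per-cell expanding while-loop with a generator over rows.
-- outside the precondition, e.g. on get_vert(['ab', ''], -1): A returns -1, B returns 1
import Mathlib
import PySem

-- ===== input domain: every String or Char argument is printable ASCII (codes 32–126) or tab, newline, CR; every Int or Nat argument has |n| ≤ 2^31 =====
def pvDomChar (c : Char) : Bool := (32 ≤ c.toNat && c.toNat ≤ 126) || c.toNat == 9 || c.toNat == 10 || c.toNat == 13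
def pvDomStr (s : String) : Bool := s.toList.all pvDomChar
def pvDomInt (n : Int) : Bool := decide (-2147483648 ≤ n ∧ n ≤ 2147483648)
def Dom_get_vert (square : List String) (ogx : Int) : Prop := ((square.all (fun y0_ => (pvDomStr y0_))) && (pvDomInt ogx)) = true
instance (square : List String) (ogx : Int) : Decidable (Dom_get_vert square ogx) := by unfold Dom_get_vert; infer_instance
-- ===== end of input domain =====

-- B transposes the grid once into columns and tests each axis by one reversed-slice comparison;
-- neither version mutates its arguments.

-- ===== PORT A =====
-- square[y][nx] == square[y][px] for all y  (the generator inside `all`)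
def pvColEq (rows : List (List Char)) (a b : Int) : Bool :=
  rows.all (fun r => PySem.List.pyGet? r a == PySem.List.pyGet? r b)

-- the `while 0 <= nx and px < len(square[0])` loop; returns true iff it ended WITHOUT break
def pvInner (rows : List (List Char)) (W nx px : Int) : Bool :=
  if 0 ≤ nx ∧ px < W then
    (if pvColEq rows nx px then pvInner rows W (nx - 1) (px + 1) else false)
  else true
termination_by (W - px).toNat
decreasing_by omega

-- the `for x in range(1, len(square[0]))` loop with its early return
def pvALoop (rows : List (List Char)) (W ogx : Int) : List Int → Int
  | [] => -1
  | x :: xs =>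
    if pvInner rows W (x - 1) x then
      (if ogx ≠ x then x else pvALoop rows W ogx xs)
    else pvALoop rows W ogx xs

def get_vert (square : List String) (ogx : Int) : Int :=
  let rows := square.map String.toList
  let W : Int := (((PySem.List.pyGet? rows 0).getD []).length : Int)
  pvALoop rows W ogx (PySem.List.pyRange 1 W 1)

-- ===== PORT B =====
-- number of columns produced by zip(*square): the shortest row length (0 for no rows)
def pvMinLen (rows : List (List Char)) : Nat :=
  match rows with
  | [] => 0
  | r :: rs => rs.foldl (fun m s => min m s.length) r.length

-- cols = list(zip(*square)); column j holds row[j] for every row (exact for j < shortest row)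
def pvCols (rows : List (List Char)) : List (List Char) :=
  (List.range (pvMinLen rows)).map (fun j => rows.map (fun r => r.getD j ' '))

-- the `for x in range(1, W)` loop of Source B: cols[x-k:x][::-1] == cols[x:x+k]
def pvBLoop (cols : List (List Char)) (W ogx : Int) : List Int → Int
  | [] => -1
  | x :: xs =>
    let k := min x (W - x)
    if x ≠ ogx ∧ (PySem.List.slice cols (some (x - k)) (some x)).reverse
                  = PySem.List.slice cols (some x) (some (x + k)) then x
    else pvBLoop cols W ogx xs

def get_vert_alt (square : List String) (ogx : Int) : Int :=
  let rows := square.map String.toList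
  let W : Int := (((PySem.List.pyGet? rows 0).getD []).length : Int)
  pvBLoop (pvCols rows) W ogx (PySem.List.pyRange 1 W 1)

-- ===== PRECONDITION & SPEC =====
-- Pre_ excludes the empty list (square[0] raises IndexError) and ragged lists with a row
-- shorter than the first (A either raises IndexError or returns a value that depends on the
-- accidental short-circuit order of its cell comparisons — a corner nobody would specify).
def Pre_get_vert (square : List String) (ogx : Int) : Prop :=
  square ≠ [] ∧ ∀ s ∈ square, (square.headD "").length ≤ s.length
instance (square : List String) (ogx : Int) : Decidable (Pre_get_vert square ogx) := by
  unfold Pre_get_vert; infer_instance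

def pvWitness_get_vert : List String × Int := (["#.##.", "..#..", "#.##."], -1)

def Spec_get_vert (square : List String) (ogx : Int) (out : Int) : Prop := out = get_vert_alt square ogx
instance (square : List String) (ogx : Int) (out : Int) : Decidable (Spec_get_vert square ogx out) := by unfold Spec_get_vert; infer_instance

-- ===== CLAIM (what is proved, stated in full; the proofs are below) =====
def Claim_equal_get_vert : Prop := ∀ (square : List String) (ogx : Int), Dom_get_vert square ogx → Pre_get_vert square ogx → Spec_get_vert square ogx (get_vert square ogx)

-- ===== LEMMAS AND PROOFS =====

-- characterization of the while-loop: it completes without break iff every reachable mirrored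
-- column pair agrees
theorem pvInner_iff (rows : List (List Char)) (W nx px : Int) :
    pvInner rows W nx px = true ↔
      ∀ d : Int, 0 ≤ d → 0 ≤ nx - d → px + d < W → pvColEq rows (nx - d) (px + d) = true := by
  fun_induction pvInner rows W nx px with
  | case1 nx px h hc ih =>
    rw [ih]
    constructor
    · intro h2 d hd0 hdn hdp
      rcases eq_or_lt_of_le hd0 with he | hlt
      · simpa [← he] using hc
      · have h3 := h2 (d - 1) (by omega) (by omega) (by omega)
        rw [show nx - 1 - (d - 1) = nx - d by ring, show px + 1 + (d - 1) = px + d by ring] at h3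
        exact h3
    · intro h2 d hd0 hdn hdp
      have h3 := h2 (d + 1) (by omega) (by omega) (by omega)
      rw [show nx - (d + 1) = nx - 1 - d by ring, show px + (d + 1) = px + 1 + d by ring] at h3
      exact h3
  | case2 nx px h hc =>
    simp only [Bool.false_eq_true, false_iff]
    intro h2
    exact hc (by simpa using h2 0 le_rfl (by omega) (by omega))
  | case3 nx px h =>
    simp only [true_iff]
    intro d hd0 hdn hdp
    omega

theorem pvFoldlMin (rs : List (List Char)) (a : Nat) (h : ∀ s ∈ rs, a ≤ s.length) :
    rs.foldl (fun m s => min m s.length) a = a := by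
  induction rs generalizing a with
  | nil => rfl
  | cons r rs ih =>
    simp only [List.foldl_cons]
    rw [min_eq_left (h r (by simp))]
    exact ih a (fun s hs => h s (by simp [hs]))

-- the shortest row of a Pre_-respecting grid is the first row
theorem pvMinLen_eq (r : List Char) (rs : List (List Char))
    (h : ∀ s ∈ rs, r.length ≤ s.length) : pvMinLen (r :: rs) = r.length := by
  unfold pvMinLen; exact pvFoldlMin rs r.length h

theorem pvCols_length (rows : List (List Char)) : (pvCols rows).length = pvMinLen rows := by
  simp [pvCols]

theorem pvCols_getD (rows : List (List Char)) (j : Nat) (hj : j < pvMinLen rows) :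
    (pvCols rows).getD j [] = rows.map (fun r => r.getD j ' ') := by
  unfold pvCols
  rw [List.getD_eq_getElem _ _ (by simpa using hj)]
  simp

-- a column-pair comparison of A equals equality of B's extracted columns
theorem pvColEq_iff_cols (rows : List (List Char)) (Wn : Nat)
    (hlen : ∀ r ∈ rows, Wn ≤ r.length) (hW : pvMinLen rows = Wn)
    (a b : Nat) (ha : a < Wn) (hb : b < Wn) :
    pvColEq rows (a : Int) (b : Int) = true ↔ (pvCols rows).getD a [] = (pvCols rows).getD b [] := by
  rw [pvCols_getD rows a (by omega), pvCols_getD rows b (by omega)]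
  unfold pvColEq
  rw [List.all_eq_true, List.map_inj_left]
  apply forall_congr'; intro r
  apply imp_congr_right; intro hr
  have hla : a < r.length := lt_of_lt_of_le ha (hlen r hr)
  have hlb : b < r.length := lt_of_lt_of_le hb (hlen r hr)
  rw [PySem.List.pyGet?_natCast, PySem.List.pyGet?_natCast,
      List.getElem?_eq_getElem hla, List.getElem?_eq_getElem hlb,
      List.getD_eq_getElem r ' ' hla, List.getD_eq_getElem r ' ' hlb]
  simp

theorem pvListEq_iff_getD (l1 l2 : List (List Char)) (h : l1.length = l2.length) :
    l1 = l2 ↔ ∀ i < l1.length, l1.getD i [] = l2.getD i [] := by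
  constructor
  · intro he i _; rw [he]
  · intro hp
    apply List.ext_getElem h
    intro i h1 h2
    have := hp i h1
    rwa [List.getD_eq_getElem _ _ h1, List.getD_eq_getElem _ _ h2] at this

theorem pvGetD_take_drop (cols : List (List Char)) (a n i : Nat) (h : i < n)
    (h2 : a + n ≤ cols.length) :
    ((cols.drop a).take n).getD i [] = cols.getD (a + i) [] := by
  rw [List.getD_eq_getElem _ _ (by simp [List.length_take, List.length_drop]; omega)]
  rw [List.getElem_take, List.getElem_drop]
  rw [List.getD_eq_getElem _ _ (by omega)]

theorem pvGetD_reverse (l : List (List Char)) (i : Nat) (h : i < l.length) :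
    l.reverse.getD i [] = l.getD (l.length - 1 - i) [] := by
  rw [List.getD_eq_getElem _ _ (by simpa using h), List.getElem_reverse,
      List.getD_eq_getElem _ _ (by omega)]

-- the reversed-slice comparison spelled out pointwise
theorem pvSlice_iff (cols : List (List Char)) (Wn : Nat) (hc : cols.length = Wn)
    (x : Int) (hx1 : 1 ≤ x) (hxW : x < (Wn : Nat)) :
    ((PySem.List.slice cols (some (x - min x ((Wn : Int) - x))) (some x)).reverse
        = PySem.List.slice cols (some x) (some (x + min x ((Wn : Int) - x))))
      ↔ ∀ d : Nat, (d : Int) < min x ((Wn : Int) - x) →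
          cols.getD (x.toNat - 1 - d) [] = cols.getD (x.toNat + d) [] := by
  set k : Int := min x ((Wn : Int) - x) with hk
  have hk1 : 1 ≤ k := by omega
  have hkx : k ≤ x := by omega
  have hkW : x + k ≤ (Wn : Int) := by omega
  rw [PySem.List.slice_toNat cols (by omega) (by omega),
      PySem.List.slice_toNat cols (by omega) (by omega)]
  rw [show (x - k).toNat = x.toNat - k.toNat by omega,
      show x.toNat - (x.toNat - k.toNat) = k.toNat by omega,
      show (x + k).toNat - x.toNat = k.toNat by omega]
  have hlL : ((cols.drop (x.toNat - k.toNat)).take k.toNat).length = k.toNat := by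
    simp [List.length_take, List.length_drop, hc]; omega
  have hlR : ((cols.drop x.toNat).take k.toNat).length = k.toNat := by
    simp [List.length_take, List.length_drop, hc]; omega
  rw [pvListEq_iff_getD _ _ (by rw [List.length_reverse, hlL, hlR])]
  rw [List.length_reverse, hlL]
  constructor
  · intro h d hd
    have hdk : d < k.toNat := by omega
    have h2 := h d hdk
    rw [pvGetD_reverse _ _ (by rw [hlL]; exact hdk), hlL,
        pvGetD_take_drop cols _ _ _ (by omega) (by omega),
        pvGetD_take_drop cols _ _ _ hdk (by omega),
        show x.toNat - k.toNat + (k.toNat - 1 - d) = x.toNat - 1 - d by omega] at h2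
    exact h2
  · intro h i hi
    rw [pvGetD_reverse _ _ (by rw [hlL]; exact hi), hlL,
        pvGetD_take_drop cols _ _ _ (by omega) (by omega),
        pvGetD_take_drop cols _ _ _ hi (by omega),
        show x.toNat - k.toNat + (k.toNat - 1 - i) = x.toNat - 1 - i by omega]
    exact h i (by omega)

-- both loops are find-first over the same list of candidates
theorem pvLoops_eq (rows cols : List (List Char)) (W ogx : Int) (l : List Int)
    (h : ∀ x ∈ l, (pvInner rows W (x - 1) x = true) ↔
        ((PySem.List.slice cols (some (x - min x (W - x))) (some x)).reverse
          = PySem.List.slice cols (some x) (some (x + min x (W - x))))) :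
    pvALoop rows W ogx l = pvBLoop cols W ogx l := by
  induction l with
  | nil => rfl
  | cons x xs ih =>
    have hx := h x (by simp)
    have hrest : pvALoop rows W ogx xs = pvBLoop cols W ogx xs :=
      ih (fun y hy => h y (by simp [hy]))
    simp only [pvALoop, pvBLoop]
    by_cases hinner : pvInner rows W (x - 1) x = true
    · rw [if_pos hinner]
      by_cases hogx : ogx = x
      · rw [if_neg (by simp [hogx]), if_neg (by simp [hogx]), hrest]
      · rw [if_pos hogx, if_pos ⟨Ne.symm hogx, hx.mp hinner⟩]
    · rw [if_neg hinner, if_neg (fun hcl => hinner (hx.mpr hcl.2)), hrest]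

-- ===== VERDICT (by name: the statement is the Claim_ definition above) =====
theorem get_vert_spec : Claim_equal_get_vert := by
  intro square ogx _hdom hpre
  unfold Spec_get_vert get_vert get_vert_alt
  obtain ⟨hne, hlen⟩ := hpre
  obtain ⟨s0, sq', rfl⟩ : ∃ s0 sq', square = s0 :: sq' := by
    cases square with
    | nil => exact absurd rfl hne
    | cons a l => exact ⟨a, l, rfl⟩
  simp only [List.map_cons, PySem.List.pyGet?_zero_cons, Option.getD_some]
  set rows : List (List Char) := s0.toList :: sq'.map String.toList with hrows
  set Wn : Nat := s0.toList.length with hWn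
  have hrlen : ∀ r ∈ rows, Wn ≤ r.length := by
    intro r hr
    rw [hrows, List.mem_cons] at hr
    rcases hr with rfl | hm
    · omega
    · obtain ⟨s, hs, rfl⟩ := List.mem_map.mp hm
      have h4 := hlen s (List.mem_cons_of_mem _ hs)
      simp only [List.headD_cons] at h4
      have h5 : s0.toList.length = s0.length := by simp
      have h6 : s.toList.length = s.length := by simp
      omega
  have hmin : pvMinLen rows = Wn := by
    rw [hrows]
    exact pvMinLen_eq _ _ (fun s hs => hrlen s (by rw [hrows]; simp [hs]))
  have hclen : (pvCols rows).length = Wn := by rw [pvCols_length, hmin]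
  apply pvLoops_eq rows (pvCols rows) (Wn : Int) ogx
  intro x hx
  have hxb := (PySem.List.mem_pyRange_one).mp hx
  have hx1 : 1 ≤ x := hxb.1
  have hx2 : x < (Wn : Int) := hxb.2
  rw [pvInner_iff, pvSlice_iff (pvCols rows) Wn hclen x hx1 hx2]
  constructor
  · intro h d hd
    have hdx : (d : Int) ≤ x - 1 := by omega
    have h2 := h (d : Int) (by omega) (by omega) (by omega)
    rw [show x - 1 - (d : Int) = ((x.toNat - 1 - d : Nat) : Int) by omega,
        show x + (d : Int) = ((x.toNat + d : Nat) : Int) by omega] at h2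
    exact (pvColEq_iff_cols rows Wn hrlen hmin _ _ (by omega) (by omega)).mp h2
  · intro h d hd0 hdn hdp
    have h2 := h d.toNat (by omega)
    have h3 := (pvColEq_iff_cols rows Wn hrlen hmin _ _ (by omega) (by omega)).mpr h2
    rw [show ((x.toNat - 1 - d.toNat : Nat) : Int) = x - 1 - d by omega,
        show ((x.toNat + d.toNat : Nat) : Int) = x + d by omega] at h3
    exact h3
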